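-- pv_equiv track=rewrite | github.com/jiwoochris/hoesik-vote-backend | test.py | count_divisible_subarrays
-- ===== SOURCE A (Python) =====
-- def count_divisible_subarrays(A, K):
-- 	"""
-- 	배열 A의 연속 부분배열 중 모든 원소를 곱한 값이 K의 배수인 부분배열의 개수를 반환
--
-- 	Args:
-- 		A: 정수 배열
-- 		K: 양의 정수
--
-- 	Returns:
-- 		K의 배수가 되는 부분배열의 총 개수
-- 	"""
-- 	from collections import defaultdict
--
-- 	def prime_factorize(n):
-- 		"""정수 n의 소인수분해 결과를 딕셔너리로 반환"""
-- 		factors = defaultdict(int)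
-- 		d = 2
-- 		while d * d <= n:
-- 			while n % d == 0:
-- 				factors[d] += 1
-- 				n //= d
-- 			d += 1
-- 		if n > 1:
-- 			factors[n] += 1
-- 		return factors
--
-- 	def is_divisible_by_k(product_factors, k_factors):
-- 		"""product_factors가 k_factors로 나누어떨어지는지 확인"""
-- 		for prime, required_count in k_factors.items():
-- 			if product_factors.get(prime, 0) < required_count:
-- 				return False
-- 		return True
--
-- 	# K의 소인수분해
-- 	k_factors = prime_factorize(K)
--
-- 	# 각 원소의 소인수분해 미리 계산
-- 	element_factors = [prime_factorize(num) for num in A]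
--
-- 	count = 0
-- 	n = len(A)
--
-- 	# 모든 부분배열 [l, r]에 대해 검사
-- 	for l in range(n):
-- 		current_factors = defaultdict(int)
--
-- 		for r in range(l, n):
-- 			# A[r]의 소인수들을 현재 곱에 추가
-- 			for prime, exp in element_factors[r].items():
-- 				current_factors[prime] += exp
--
-- 			# 현재 부분배열의 곱이 K의 배수인지 확인
-- 			if is_divisible_by_k(current_factors, k_factors):
-- 				count += 1
--
-- 	return count
-- ===== SOURCE B (Python) =====
-- def count_divisible_subarrays(A, K):
--     def prime_factorize(n):
--         factors = []
--         d = 2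
--         while d * d <= n:
--             e = 0
--             while n % d == 0:
--                 e += 1
--                 n //= d
--             if e > 0:
--                 factors.append((d, e))
--             d += 1
--         if n > 1:
--             factors.append((n, 1))
--         return factors
--
--     def exp_in(factors, p):
--         for q, e in factors:
--             if q == p:
--                 return e
--         return 0
--
--     def lower_bound(pref, x):
--         lo, hi = 0, len(pref)
--         while lo < hi:
--             mid = (lo + hi) // 2
--             if pref[mid] < x:
--                 lo = mid + 1
--             else:
--                 hi = mid
--         return lo
--
--     kf = prime_factorize(K)
--     elem = [prime_factorize(x) for x in A]
--     n = len(A)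
--
--     def prefix_sums(p):
--         pref = [0]
--         for f in elem:
--             pref.append(pref[-1] + exp_in(f, p))
--         return pref
--
--     prefs = [prefix_sums(p) for p, _ in kf]
--     count = 0
--     for l in range(n):
--         t = l
--         for j in range(len(kf)):
--             t = max(t, lower_bound(prefs[j], prefs[j][l] + kf[j][1]))
--         lo = max(t, l + 1)
--         if lo <= n:
--             count += n - lo + 1
--     return count
-- ===== Notes on version B (the rewrite author's own statement) =====
-- stated objective: faster
-- what changed: Replaces A's O(n^2) enumeration of all windows (re-accumulating a factor dictionary per left endpoint) by per-prime prefix exponent sums and, for each left endpoint, a binary search for the monotone divisibility threshold, counting all valid right endpoints in one step.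
import Mathlib
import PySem

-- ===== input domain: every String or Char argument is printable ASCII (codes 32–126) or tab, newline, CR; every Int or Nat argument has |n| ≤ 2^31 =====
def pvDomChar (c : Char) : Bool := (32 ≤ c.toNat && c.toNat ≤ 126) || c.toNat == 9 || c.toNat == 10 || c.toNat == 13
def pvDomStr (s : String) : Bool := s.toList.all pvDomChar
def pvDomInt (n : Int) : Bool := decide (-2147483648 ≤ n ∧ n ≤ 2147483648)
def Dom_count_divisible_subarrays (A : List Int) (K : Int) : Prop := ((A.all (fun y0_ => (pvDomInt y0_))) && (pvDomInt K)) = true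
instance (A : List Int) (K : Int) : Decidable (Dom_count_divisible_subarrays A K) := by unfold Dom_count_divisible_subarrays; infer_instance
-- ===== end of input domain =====

-- B replaces A's O(n^2) window enumeration by per-prime prefix exponent sums plus a binary
-- search for the monotone divisibility threshold of each left endpoint (objective: faster).

-- ===== PORT A =====
-- termination fact for the trial-division loops, cited by 'decreasing_by' below
theorem pv_step (d n : Int) (h : 2 ≤ d ∧ n ≠ 0 ∧ PySem.Int.mod n d = 0) :
    d * PySem.Int.floordiv n d = n ∧ (PySem.Int.floordiv n d).natAbs < n.natAbs := by
  obtain ⟨hd, hn, hmod⟩ := h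
  obtain ⟨q, hq⟩ := (PySem.Int.mod_eq_zero_iff_dvd n d).mp hmod
  have hdiv : PySem.Int.floordiv n d = q := by
    rw [PySem.Int.floordiv_eq_ediv_of_pos (by omega), hq,
      Int.mul_ediv_cancel_left _ (by omega : d ≠ 0)]
  refine ⟨by rw [hdiv, hq], ?_⟩
  rw [hdiv]
  have h1 : n.natAbs = d.natAbs * q.natAbs := by rw [hq]; exact Int.natAbs_mul d q
  have h3 : q.natAbs ≠ 0 := by
    intro h0; apply hn; rw [hq]; have : q = 0 := by omega
    simp [this]
  have h4 := Nat.mul_le_mul_right q.natAbs (show 2 ≤ d.natAbs by omega)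
  omega


-- inner 'while n % d == 0: factors[d] += 1; n //= d' of A's prime_factorize.
-- The conjuncts '2 ≤ d ∧ n ≠ 0' are totality guards only: every call Python reaches
-- has d ≥ 2 and n ≥ 4 (the loop is entered only under d*d <= n), where they hold.
def pvFactAIn (d n : Int) (facs : PySem.Dict Int Int) : Int × PySem.Dict Int Int :=
  if h : 2 ≤ d ∧ n ≠ 0 ∧ PySem.Int.mod n d = 0 then
    pvFactAIn d (PySem.Int.floordiv n d) (facs.modify d 0 (· + 1))
  else (n, facs)
  termination_by n.natAbs
  decreasing_by exact (pv_step _ _ h).2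

-- bounds on the inner loop's remaining n, cited by pvFactAOut's decreasing_by
theorem pvFactAIn_fst_bounds (d n : Int) (facs : PySem.Dict Int Int) (hn : 1 ≤ n) :
    1 ≤ (pvFactAIn d n facs).1 ∧ (pvFactAIn d n facs).1 ≤ n := by
  induction n, facs using pvFactAIn.induct d with
  | case1 n facs h ih =>
    rw [pvFactAIn, dif_pos h]
    obtain ⟨hd, hn0, hmod⟩ := h
    obtain ⟨q, hq⟩ := (PySem.Int.mod_eq_zero_iff_dvd n d).mp hmod
    have hdiv : PySem.Int.floordiv n d = q := by
      rw [PySem.Int.floordiv_eq_ediv_of_pos (by omega), hq,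
        Int.mul_ediv_cancel_left _ (by omega : d ≠ 0)]
    have hq1 : 1 ≤ q := by nlinarith
    have := ih (by rw [hdiv]; omega)
    rw [hdiv] at this ⊢
    refine ⟨this.1, le_trans this.2 (by nlinarith)⟩
  | case2 n facs h => rw [pvFactAIn, dif_neg h]; exact ⟨hn, le_refl n⟩

theorem pvFactAOut_dec (d n : Int) (facs : PySem.Dict Int Int) (h : 2 ≤ d ∧ d * d ≤ n) :
    ((pvFactAIn d n facs).1 + 2 - (d + 1)).toNat < (n + 2 - d).toNat := by
  obtain ⟨hd, hdn⟩ := h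
  have hn4 : 4 ≤ n := by nlinarith
  have hb := pvFactAIn_fst_bounds d n facs (by omega)
  have hdlen : d ≤ n := by nlinarith
  omega

-- outer 'while d * d <= n' of A's prime_factorize ('2 ≤ d' is a totality guard; d starts at 2)
def pvFactAOut (d n : Int) (facs : PySem.Dict Int Int) : PySem.Dict Int Int :=
  if h : 2 ≤ d ∧ d * d ≤ n then
    pvFactAOut (d + 1) (pvFactAIn d n facs).1 (pvFactAIn d n facs).2
  else if 1 < n then facs.modify n 0 (· + 1) else facs
  termination_by (n + 2 - d).toNat
  decreasing_by exact pvFactAOut_dec d n facs h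

-- A's is_divisible_by_k: a for-loop over k_factors.items() returning False early
def pvIsDiv (product_factors k_factors : PySem.Dict Int Int) : Bool :=
  k_factors.items.all (fun pe => !decide (product_factors.getD pe.1 0 < pe.2))

def count_divisible_subarrays (A : List Int) (K : Int) : Int :=
  let k_factors := pvFactAOut 2 K PySem.Dict.empty
  let element_factors := A.map (fun num => pvFactAOut 2 num PySem.Dict.empty)
  let n := PySem.List.len A
  (PySem.List.pyRange 0 n).foldl (fun count l =>
    ((PySem.List.pyRange l n).foldl
      (fun (st : PySem.Dict Int Int × Int) r =>
        let cur := (PySem.List.pyGetD element_factors r PySem.Dict.empty).items.foldl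
          (fun c pe => c.modify pe.1 0 (· + pe.2)) st.1
        (cur, if pvIsDiv cur k_factors then st.2 + 1 else st.2))
      (PySem.Dict.empty, count)).2) 0

-- ===== PORT B =====
-- inner 'while n % d == 0: e += 1; n //= d' of B's prime_factorize (same totality guards)
def pvFactBIn (d n e : Int) : Int × Int :=
  if h : 2 ≤ d ∧ n ≠ 0 ∧ PySem.Int.mod n d = 0 then
    pvFactBIn d (PySem.Int.floordiv n d) (e + 1)
  else (n, e)
  termination_by n.natAbs
  decreasing_by exact (pv_step _ _ h).2

theorem pvFactBIn_fst_bounds (d n e : Int) (hn : 1 ≤ n) :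
    1 ≤ (pvFactBIn d n e).1 ∧ (pvFactBIn d n e).1 ≤ n := by
  induction n, e using pvFactBIn.induct d with
  | case1 n e h ih =>
    rw [pvFactBIn, dif_pos h]
    obtain ⟨hd, hn0, hmod⟩ := h
    obtain ⟨q, hq⟩ := (PySem.Int.mod_eq_zero_iff_dvd n d).mp hmod
    have hdiv : PySem.Int.floordiv n d = q := by
      rw [PySem.Int.floordiv_eq_ediv_of_pos (by omega), hq,
        Int.mul_ediv_cancel_left _ (by omega : d ≠ 0)]
    have hq1 : 1 ≤ q := by nlinarith
    have := ih (by rw [hdiv]; omega)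
    rw [hdiv] at this ⊢
    refine ⟨this.1, le_trans this.2 (by nlinarith)⟩
  | case2 n e h => rw [pvFactBIn, dif_neg h]; exact ⟨hn, le_refl n⟩

theorem pvFactBOut_dec (d n : Int) (h : 2 ≤ d ∧ d * d ≤ n) :
    ((pvFactBIn d n 0).1 + 2 - (d + 1)).toNat < (n + 2 - d).toNat := by
  obtain ⟨hd, hdn⟩ := h
  have hn4 : 4 ≤ n := by nlinarith
  have hb := pvFactBIn_fst_bounds d n 0 (by omega)
  have hdlen : d ≤ n := by nlinarith
  omega

-- outer loop of B's prime_factorize, building the (prime, exponent) list in order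
def pvFactBOut (d n : Int) (factors : List (Int × Int)) : List (Int × Int) :=
  if h : 2 ≤ d ∧ d * d ≤ n then
    pvFactBOut (d + 1) (pvFactBIn d n 0).1
      (if 0 < (pvFactBIn d n 0).2 then factors ++ [(d, (pvFactBIn d n 0).2)] else factors)
  else if 1 < n then factors ++ [(n, 1)] else factors
  termination_by (n + 2 - d).toNat
  decreasing_by exact pvFactBOut_dec d n h

-- B's exp_in: first-match scan of the (prime, exponent) list
def pvExpIn (factors : List (Int × Int)) (p : Int) : Int :=
  match factors with
  | [] => 0
  | qe :: t => if qe.1 == p then qe.2 else pvExpIn t p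

theorem pvLBGo_dec1 (lo hi : Int) (h : lo < hi) :
    (hi - (PySem.Int.floordiv (lo + hi) 2 + 1)).toNat < (hi - lo).toNat := by
  have := PySem.Int.floordiv_two_mid_bounds (le_of_lt h)
  omega

theorem pvLBGo_dec2 (lo hi : Int) (h : lo < hi) :
    (PySem.Int.floordiv (lo + hi) 2 - lo).toNat < (hi - lo).toNat := by
  have := PySem.Int.floordiv_two_mid_bounds (le_of_lt h)
  have hlt : PySem.Int.floordiv (lo + hi) 2 < hi := by
    rw [PySem.Int.floordiv_lt_iff_lt_mul (by omega)]; omega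
  omega

-- B's lower_bound: 'while lo < hi' binary search
def pvLBGo (pref : List Int) (x lo hi : Int) : Int :=
  if h : lo < hi then
    let mid := PySem.Int.floordiv (lo + hi) 2
    if PySem.List.pyGetD pref mid 0 < x then pvLBGo pref x (mid + 1) hi
    else pvLBGo pref x lo mid
  else lo
  termination_by (hi - lo).toNat
  decreasing_by
    · exact pvLBGo_dec1 lo hi h
    · exact pvLBGo_dec2 lo hi h

def pvLB (pref : List Int) (x : Int) : Int := pvLBGo pref x 0 (PySem.List.len pref)

def count_divisible_subarrays_alt (A : List Int) (K : Int) : Int :=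
  let kf := pvFactBOut 2 K []
  let elem := A.map (fun x => pvFactBOut 2 x [])
  let n := PySem.List.len A
  let prefs := kf.map (fun pe =>
    elem.foldl (fun pref f => pref ++ [PySem.List.pyGetD pref (-1) 0 + pvExpIn f pe.1]) [(0 : Int)])
  (PySem.List.pyRange 0 n).foldl (fun count l =>
    let t := (PySem.List.pyRange 0 (PySem.List.len kf)).foldl (fun t j =>
      max t (pvLB (PySem.List.pyGetD prefs j [])
        (PySem.List.pyGetD (PySem.List.pyGetD prefs j []) l 0 + (PySem.List.pyGetD kf j (0, 0)).2))) l
    let lo := max t (l + 1)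
    if lo ≤ n then count + (n - lo + 1) else count) 0

-- ===== PRECONDITION & SPEC =====
def Spec_count_divisible_subarrays (A : List Int) (K : Int) (out : Int) : Prop := out = count_divisible_subarrays_alt A K
instance (A : List Int) (K : Int) (out : Int) : Decidable (Spec_count_divisible_subarrays A K out) := by unfold Spec_count_divisible_subarrays; infer_instance

-- ===== CLAIM (what is proved, stated in full; the proofs are below) =====
def Claim_equal_count_divisible_subarrays : Prop := ∀ (A : List Int) (K : Int), Dom_count_divisible_subarrays A K → Spec_count_divisible_subarrays A K (count_divisible_subarrays A K)

-- ===== LEMMAS AND PROOFS =====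

-- spec-side abbreviations (proof-only)
def pvE (q x : Int) : Int := pvExpIn (pvFactBOut 2 x []) q
def pvS (A : List Int) (q : Int) (l m : Nat) : Int := (((A.take m).drop l).map (pvE q)).sum
def pvOkP (A : List Int) (K : Int) (l t : Nat) : Bool :=
  (pvFactBOut 2 K []).all (fun pe => !decide (pvS A pe.1 l t < pe.2))

theorem pvFactBIn_snd_add (d : Int) : ∀ (m : Nat) (n : Int), n.natAbs = m →
    ∀ e, (pvFactBIn d n e).2 = e + (pvFactBIn d n 0).2 := by
  intro m
  induction m using Nat.strong_induction_on with
  | _ m ih =>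
    intro n hm e
    by_cases h : 2 ≤ d ∧ n ≠ 0 ∧ PySem.Int.mod n d = 0
    · rw [show pvFactBIn d n e = pvFactBIn d (PySem.Int.floordiv n d) (e + 1) from by
          rw [pvFactBIn, dif_pos h],
        show pvFactBIn d n 0 = pvFactBIn d (PySem.Int.floordiv n d) (0 + 1) from by
          rw [pvFactBIn, dif_pos h]]
      have hlt := (pv_step d n h).2
      rw [ih _ (by omega) _ rfl (e + 1), ih _ (by omega) _ rfl (0 + 1)]
      omega
    · rw [pvFactBIn, dif_neg h, pvFactBIn, dif_neg h]
      simp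

theorem pvFactBIn_snd_nonneg (d n e : Int) (he : 0 ≤ e) : 0 ≤ (pvFactBIn d n e).2 := by
  have hgen : ∀ (m : Nat) (n : Int), n.natAbs = m → ∀ e, 0 ≤ e → 0 ≤ (pvFactBIn d n e).2 := by
    intro m
    induction m using Nat.strong_induction_on with
    | _ m ih =>
      intro n hm e he
      by_cases h : 2 ≤ d ∧ n ≠ 0 ∧ PySem.Int.mod n d = 0
      · rw [pvFactBIn, dif_pos h]
        have hlt := (pv_step d n h).2
        exact ih _ (by omega) _ rfl (e + 1) (by omega)
      · rw [pvFactBIn, dif_neg h]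
        exact he
  exact hgen _ n rfl e he

theorem pvFactAIn_fst_eq (d n : Int) (facs : PySem.Dict Int Int) (e : Int) :
    (pvFactAIn d n facs).1 = (pvFactBIn d n e).1 := by
  induction n, facs using pvFactAIn.induct d generalizing e with
  | case1 n facs h ih =>
    rw [pvFactAIn, dif_pos h, pvFactBIn, dif_pos h]
    exact ih _
  | case2 n facs h =>
    rw [pvFactAIn, dif_neg h, pvFactBIn, dif_neg h]

theorem pvFactAIn_snd_eq (d n : Int) (facs : PySem.Dict Int Int) :
    (pvFactAIn d n facs).2 =
      if 0 < (pvFactBIn d n 0).2 then facs.modify d 0 (· + (pvFactBIn d n 0).2) else facs := by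
  induction n, facs using pvFactAIn.induct d with
  | case1 n facs h ih =>
    rw [pvFactAIn, dif_pos h, ih]
    have hk0 : 0 ≤ (pvFactBIn d (PySem.Int.floordiv n d) 0).2 :=
      pvFactBIn_snd_nonneg d _ 0 le_rfl
    have hsnd : (pvFactBIn d n 0).2 = 1 + (pvFactBIn d (PySem.Int.floordiv n d) 0).2 := by
      rw [pvFactBIn, dif_pos h, pvFactBIn_snd_add d _ _ rfl]
      omega
    rw [hsnd, if_pos (show (0:Int) < 1 + (pvFactBIn d (PySem.Int.floordiv n d) 0).2 by omega)]
    by_cases hkp : 0 < (pvFactBIn d (PySem.Int.floordiv n d) 0).2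
    · rw [if_pos hkp]
      simp only [PySem.Dict.modify, PySem.Dict.getD_insert_self, PySem.Dict.insert_insert_self]
      rw [show facs.getD d 0 + 1 + (pvFactBIn d (PySem.Int.floordiv n d) 0).2
          = facs.getD d 0 + (1 + (pvFactBIn d (PySem.Int.floordiv n d) 0).2) by ring]
    · rw [if_neg hkp]
      have hke : (pvFactBIn d (PySem.Int.floordiv n d) 0).2 = 0 := by omega
      simp [hke, PySem.Dict.modify]
  | case2 n facs h =>
    rw [pvFactAIn, dif_neg h, pvFactBIn, dif_neg h]
    simp

theorem pvFactBIn_fst_dvd (d n e : Int) : (pvFactBIn d n e).1 ∣ n := by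
  induction n, e using pvFactBIn.induct d with
  | case1 n e h ih =>
    rw [pvFactBIn, dif_pos h]
    exact dvd_trans ih (Dvd.intro_left d (pv_step d n h).1)
  | case2 n e h =>
    rw [pvFactBIn, dif_neg h]

theorem pvFactBIn_exit (d n e : Int) (hd : 2 ≤ d) (hn : 1 ≤ n) : ¬ d ∣ (pvFactBIn d n e).1 := by
  have hgen : ∀ (m : Nat) (n : Int), n.natAbs = m → ∀ e, 1 ≤ n → ¬ d ∣ (pvFactBIn d n e).1 := by
    intro m
    induction m using Nat.strong_induction_on with
    | _ m ih =>
      intro n hm e hn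
      by_cases h : 2 ≤ d ∧ n ≠ 0 ∧ PySem.Int.mod n d = 0
      · rw [pvFactBIn, dif_pos h]
        have hstep := pv_step d n h
        have hq1 : 1 ≤ PySem.Int.floordiv n d := by nlinarith [hstep.1]
        exact ih _ (by omega) _ rfl (e + 1) hq1
      · rw [pvFactBIn, dif_neg h]
        intro hdvd
        exact h ⟨hd, by omega, (PySem.Int.mod_eq_zero_iff_dvd n d).mpr hdvd⟩
  exact hgen _ n rfl e hn

theorem pvFactAOut_items (d n : Int) (facs : PySem.Dict Int Int)
    (hsm : ∀ e, 2 ≤ e → e < d → ¬ e ∣ n)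
    (hk : ∀ k ∈ facs.items.map Prod.fst, k < d) :
    (pvFactAOut d n facs).items = pvFactBOut d n facs.items := by
  induction d, n, facs using pvFactAOut.induct with
  | case1 d n facs h ih =>
    have hn1 : 1 ≤ n := by nlinarith [h.1, h.2]
    rw [pvFactAOut, dif_pos h, pvFactBOut, dif_pos h]
    have hfst := pvFactAIn_fst_eq d n facs 0
    have hsnd := pvFactAIn_snd_eq d n facs
    have hsm' : ∀ e, 2 ≤ e → e < d + 1 → ¬ e ∣ (pvFactBIn d n 0).1 := by
      intro e he1 he2 hdvd
      rcases eq_or_lt_of_le (show e ≤ d by omega) with rfl | hlt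
      · exact pvFactBIn_exit e n 0 he1 hn1 hdvd
      · exact hsm e he1 (by omega) (dvd_trans hdvd (pvFactBIn_fst_dvd d n 0))
    rw [hfst, hsnd] at ih
    by_cases hk2 : 0 < (pvFactBIn d n 0).2
    · rw [if_pos hk2] at ih
      have hnc : facs.contains d = false := by
        by_contra hc
        have : d ∈ facs.keys := (PySem.Dict.contains_iff_mem_keys facs d).mp
          (by revert hc; cases facs.contains d <;> simp)
        exact absurd (hk d this) (lt_irrefl d)
      have hitems : (facs.modify d 0 (· + (pvFactBIn d n 0).2)).items
          = facs.items ++ [(d, (pvFactBIn d n 0).2)] := by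
        simp only [PySem.Dict.modify]
        rw [PySem.Dict.getD_of_not_contains facs 0 hnc,
          PySem.Dict.items_insert_of_not_contains facs _ hnc]
        simp
      rw [hfst, hsnd, if_pos hk2, if_pos hk2, ← hitems]
      apply ih hsm'
      rw [hitems]
      intro k hkmem
      simp only [List.map_append, List.mem_append, List.map_cons, List.map_nil,
        List.mem_cons, List.not_mem_nil, or_false] at hkmem
      rcases hkmem with hkmem | rfl
      · have := hk k hkmem; omega
      · omega
    · rw [if_neg hk2] at ih
      rw [hfst, hsnd, if_neg hk2, if_neg hk2]
      apply ih hsm'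
      intro k hkmem
      have := hk k hkmem; omega
  | case2 d n facs h hn =>
    rw [pvFactAOut, dif_neg h, if_pos hn, pvFactBOut, dif_neg h, if_pos hn]
    have hnd : n ∉ facs.items.map Prod.fst := by
      intro hmem
      exact hsm n (by omega) (hk n hmem) (dvd_refl n)
    have hnc : facs.contains n = false := by
      by_contra hc
      have : n ∈ facs.keys := (PySem.Dict.contains_iff_mem_keys facs n).mp
        (by revert hc; cases facs.contains n <;> simp)
      exact hnd this
    simp only [PySem.Dict.modify]
    rw [PySem.Dict.getD_of_not_contains facs 0 hnc,
      PySem.Dict.items_insert_of_not_contains facs _ hnc]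
    simp
  | case3 d n facs h hn =>
    rw [pvFactAOut, dif_neg h, if_neg hn, pvFactBOut, dif_neg h, if_neg hn]

theorem pvFact_items (x : Int) :
    (pvFactAOut 2 x PySem.Dict.empty).items = pvFactBOut 2 x [] := by
  exact pvFactAOut_items 2 x PySem.Dict.empty (by omega) (by simp [PySem.Dict.empty])

theorem pvFactBOut_pos (d n : Int) (fl : List (Int × Int))
    (hpos : ∀ pe ∈ fl, 0 < pe.2) : ∀ pe ∈ pvFactBOut d n fl, 0 < pe.2 := by
  induction d, n, fl using pvFactBOut.induct with
  | case1 d n fl h ih =>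
    rw [pvFactBOut, dif_pos h]
    apply ih
    by_cases hk2 : 0 < (pvFactBIn d n 0).2
    · rw [dif_pos hk2]
      intro pe hpe
      rcases List.mem_append.mp hpe with hm | hm
      · exact hpos pe hm
      · simp at hm; rw [hm]; exact hk2
    · rw [dif_neg hk2]; exact hpos
  | case2 d n fl h hn =>
    rw [pvFactBOut, dif_neg h, if_pos hn]
    intro pe hpe
    rcases List.mem_append.mp hpe with hm | hm
    · exact hpos pe hm
    · simp at hm; rw [hm]; omega
  | case3 d n fl h hn =>
    rw [pvFactBOut, dif_neg h, if_neg hn]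
    exact hpos

theorem pvFactBOut_keys (d n : Int) (fl : List (Int × Int))
    (hsm : ∀ e, 2 ≤ e → e < d → ¬ e ∣ n)
    (hk : ∀ k ∈ fl.map Prod.fst, k < d)
    (hpair : (fl.map Prod.fst).Pairwise (· < ·)) :
    ((pvFactBOut d n fl).map Prod.fst).Pairwise (· < ·) := by
  induction d, n, fl using pvFactBOut.induct with
  | case1 d n fl h ih =>
    have hn1 : 1 ≤ n := by nlinarith [h.1, h.2]
    rw [pvFactBOut, dif_pos h]
    have hsm' : ∀ e, 2 ≤ e → e < d + 1 → ¬ e ∣ (pvFactBIn d n 0).1 := by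
      intro e he1 he2 hdvd
      rcases eq_or_lt_of_le (show e ≤ d by omega) with rfl | hlt
      · exact pvFactBIn_exit e n 0 he1 hn1 hdvd
      · exact hsm e he1 (by omega) (dvd_trans hdvd (pvFactBIn_fst_dvd d n 0))
    by_cases hk2 : 0 < (pvFactBIn d n 0).2
    · rw [dif_pos hk2] at ih
      rw [if_pos hk2]
      apply ih hsm'
      · intro k hkmem
        simp only [List.map_append, List.mem_append, List.map_cons, List.map_nil,
          List.mem_cons, List.not_mem_nil, or_false] at hkmem
        rcases hkmem with hkmem | rfl
        · have := hk k hkmem; omega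
        · omega
      · rw [List.map_append, List.pairwise_append]
        refine ⟨hpair, by simp, ?_⟩
        intro a ha b hb
        simp at hb
        rw [hb]
        exact hk a ha
    · rw [dif_neg hk2] at ih
      rw [if_neg hk2]
      apply ih hsm' (fun k hkmem => by have := hk k hkmem; omega) hpair
  | case2 d n fl h hn =>
    rw [pvFactBOut, dif_neg h, if_pos hn]
    have hnd : ∀ k ∈ fl.map Prod.fst, k < n := by
      intro k hkmem
      have hkd := hk k hkmem
      by_contra hge
      have h2k : 2 ≤ n := by omega
      rcases lt_or_ge n d with hlt | hge2
      · exact hsm n h2k hlt (dvd_refl n)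
      · omega
    rw [List.map_append, List.pairwise_append]
    refine ⟨hpair, by simp, ?_⟩
    intro a ha b hb
    simp at hb
    rw [hb]
    exact hnd a ha
  | case3 d n fl h hn =>
    rw [pvFactBOut, dif_neg h, if_neg hn]
    exact hpair

theorem pvFactB_keys_nodup (x : Int) : ((pvFactBOut 2 x []).map Prod.fst).Nodup := by
  exact (pvFactBOut_keys 2 x [] (by omega) (by simp) (by simp)).imp (fun h => ne_of_lt h)

theorem pvExpIn_zero_or_mem (l : List (Int × Int)) (q : Int) :
    pvExpIn l q = 0 ∨ ∃ pe ∈ l, pvExpIn l q = pe.2 := by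
  induction l with
  | nil => left; rfl
  | cons a t ih =>
    by_cases h : a.1 == q
    · right; exact ⟨a, by simp, by simp [pvExpIn, h]⟩
    · rw [pvExpIn]; simp only [h]
      rcases ih with h0 | ⟨pe, hpe, he⟩
      · left; exact h0
      · right; exact ⟨pe, by simp [hpe], he⟩

theorem pvE_nonneg (q x : Int) : 0 ≤ pvE q x := by
  rcases pvExpIn_zero_or_mem (pvFactBOut 2 x []) q with h | ⟨pe, hpe, he⟩
  · simp [pvE, h]
  · have := pvFactBOut_pos 2 x [] (by simp) pe hpe
    simp [pvE, he]; omega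

theorem pvExpIn_eq_zero_of_not_mem (l : List (Int × Int)) (q : Int)
    (h : q ∉ l.map Prod.fst) : pvExpIn l q = 0 := by
  induction l with
  | nil => rfl
  | cons a t ih =>
    simp only [List.map_cons, List.mem_cons] at h
    push Not at h
    rw [pvExpIn]
    simp only [show (a.1 == q) = false by simp [h.1.symm]]
    exact ih h.2

theorem addloop_getD (l : List (Int × Int)) (cur : PySem.Dict Int Int) (q : Int)
    (hnd : (l.map Prod.fst).Nodup) :
    (l.foldl (fun c pe => c.modify pe.1 0 (· + pe.2)) cur).getD q 0
      = cur.getD q 0 + pvExpIn l q := by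
  induction l generalizing cur with
  | nil => simp [pvExpIn]
  | cons a t ih =>
    simp only [List.map_cons, List.nodup_cons] at hnd
    rw [List.foldl_cons, ih _ hnd.2, PySem.Dict.getD_modify, pvExpIn]
    by_cases h : q = a.1
    · rw [if_pos h]
      have ht : pvExpIn t a.1 = 0 := pvExpIn_eq_zero_of_not_mem t a.1 hnd.1
      rw [h, ht]
      simp
    · rw [if_neg h]
      simp [show (a.1 == q) = false by simp [Ne.symm h]]

theorem pvS_step (A : List Int) (q : Int) (l m : Nat) (hl : l ≤ m) (hm : m < A.length) :
    pvS A q l (m + 1) = pvS A q l m + pvE q A[m] := by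
  unfold pvS
  rw [List.take_add_one, List.getElem?_eq_getElem hm]
  rw [List.drop_append_of_le_length (by simp; omega)]
  simp

theorem pvS_split (A : List Int) (q : Int) (l t : Nat) (hl : l ≤ t) :
    pvS A q l t = pvS A q 0 t - pvS A q 0 l := by
  unfold pvS
  simp only [List.drop_zero]
  conv_rhs => rw [← List.take_append_drop l (A.take t)]
  rw [List.take_take, min_eq_left hl]
  simp

theorem pvS_mono (A : List Int) (q : Int) (i j : Nat) (hij : i ≤ j) :
    pvS A q 0 i ≤ pvS A q 0 j := by
  have h := pvS_split A q i j hij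
  have hnn : 0 ≤ pvS A q i j := by
    unfold pvS
    apply List.sum_nonneg
    intro x hx
    obtain ⟨y, _, rfl⟩ := List.mem_map.mp hx
    exact pvE_nonneg q y
  omega

theorem foldl_max_le_iff (l : List Int) (f : Int → Int) (init t : Int) :
    l.foldl (fun a j => max a (f j)) init ≤ t ↔ (init ≤ t ∧ ∀ j ∈ l, f j ≤ t) := by
  induction l generalizing init with
  | nil => simp
  | cons a tl ih =>
    simp only [List.foldl_cons, ih, max_le_iff, List.mem_cons]
    constructor
    · rintro ⟨⟨h1, h2⟩, h3⟩
      exact ⟨h1, by rintro j (rfl | hj); exact h2; exact h3 j hj⟩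
    · rintro ⟨h1, h2⟩
      exact ⟨⟨h1, h2 a (Or.inl rfl)⟩, fun j hj => h2 j (Or.inr hj)⟩

theorem countP_threshold (a b c : Int) :
    (PySem.List.pyRange a b).countP (fun r => decide (c ≤ r)) = (b - max a c).toNat := by
  have hgen : ∀ (k : Nat) (a : Int), (b - a).toNat = k →
      (PySem.List.pyRange a b).countP (fun r => decide (c ≤ r)) = (b - max a c).toNat := by
    intro k
    induction k using Nat.strong_induction_on with
    | _ k ih =>
      intro a hk
      by_cases hab : b ≤ a
      · rw [PySem.List.pyRange_one_eq_nil hab]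
        simp only [List.countP_nil]
        rcases le_total a c with h | h <;> simp [max_eq_right h, max_eq_left h] <;> omega
      · push Not at hab
        rw [PySem.List.pyRange_one_cons hab, List.countP_cons,
          ih ((b - (a+1)).toNat) (by omega) (a + 1) rfl]
        rcases le_total c a with h | h
        · rw [max_eq_left (by omega), max_eq_left h]
          simp only [decide_eq_true_eq, if_pos h]
          omega
        · rcases le_or_gt c (a + 1) with h2 | h2
          · have hca : max a c = c := max_eq_right h
            rw [hca, max_eq_left h2]
            by_cases hc : c ≤ a
            · simp only [decide_eq_true_eq, if_pos hc]; omega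
            · simp only [decide_eq_true_eq, if_neg hc]; omega
          · rw [max_eq_right h, max_eq_right (by omega)]
            simp only [decide_eq_true_eq, if_neg (by omega : ¬ c ≤ a)]
            omega
  exact hgen _ a rfl


theorem list_all_congr {α : Type} (l : List α) (f g : α → Bool)
    (h : ∀ x ∈ l, f x = g x) : l.all f = l.all g := by
  induction l with
  | nil => rfl
  | cons a t ih =>
    simp only [List.all_cons]
    rw [h a (by simp), ih (fun x hx => h x (by simp [hx]))]

theorem pvS_self (A : List Int) (q : Int) (l : Nat) : pvS A q l l = 0 := by
  unfold pvS
  rw [List.drop_eq_nil_of_le (by simp)]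
  simp

theorem innerA (A : List Int) (K : Int) (l : Int) (hl : 0 ≤ l) :
    ∀ (k : Nat) (m : Int), m = l + k → m ≤ (A.length : Int) → ∀ (c0 : Int),
    (∀ q, ((PySem.List.pyRange l m).foldl
        (fun (st : PySem.Dict Int Int × Int) r =>
          (((PySem.List.pyGetD (A.map (fun num => pvFactAOut 2 num PySem.Dict.empty)) r
              PySem.Dict.empty).items.foldl (fun c pe => c.modify pe.1 0 (· + pe.2)) st.1),
            if pvIsDiv ((PySem.List.pyGetD (A.map (fun num => pvFactAOut 2 num PySem.Dict.empty)) r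
              PySem.Dict.empty).items.foldl (fun c pe => c.modify pe.1 0 (· + pe.2)) st.1)
              (pvFactAOut 2 K PySem.Dict.empty) then st.2 + 1 else st.2))
        (PySem.Dict.empty, c0)).1.getD q 0 = pvS A q l.toNat m.toNat) ∧
    ((PySem.List.pyRange l m).foldl
        (fun (st : PySem.Dict Int Int × Int) r =>
          (((PySem.List.pyGetD (A.map (fun num => pvFactAOut 2 num PySem.Dict.empty)) r
              PySem.Dict.empty).items.foldl (fun c pe => c.modify pe.1 0 (· + pe.2)) st.1),
            if pvIsDiv ((PySem.List.pyGetD (A.map (fun num => pvFactAOut 2 num PySem.Dict.empty)) r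
              PySem.Dict.empty).items.foldl (fun c pe => c.modify pe.1 0 (· + pe.2)) st.1)
              (pvFactAOut 2 K PySem.Dict.empty) then st.2 + 1 else st.2))
        (PySem.Dict.empty, c0)).2
      = c0 + (((PySem.List.pyRange l m).countP
          (fun r => pvOkP A K l.toNat (r + 1).toNat) : Nat) : Int) := by
  intro k
  induction k with
  | zero =>
    intro m hm hmn c0
    subst hm
    simp only [Nat.cast_zero, add_zero] at *
    rw [PySem.List.pyRange_one_eq_nil le_rfl]
    simp only [List.foldl_nil, List.countP_nil]
    refine ⟨fun q => ?_, by simp⟩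
    rw [pvS_self]
    simp [PySem.Dict.empty, PySem.Dict.getD_eq_get?_getD, PySem.Dict.get?]
  | succ k ih =>
    intro m hm hmn c0
    have hm1 : m - 1 = l + k := by omega
    have hlm1 : l ≤ m - 1 := by omega
    have hrange : PySem.List.pyRange l m = PySem.List.pyRange l (m - 1) ++ [m - 1] := by
      have h := PySem.List.pyRange_one_succ_right (a := l) hlm1
      rw [show m - 1 + 1 = m by ring] at h
      exact h
    obtain ⟨ihd, ihc⟩ := ih (m - 1) hm1 (by omega) c0
    have hidx : 0 ≤ m - 1 ∧ m - 1 < ((A.map (fun num => pvFactAOut 2 num PySem.Dict.empty)).length : Int) := by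
      simp; omega
    have hgete : PySem.List.pyGetD (A.map (fun num => pvFactAOut 2 num PySem.Dict.empty)) (m - 1)
        PySem.Dict.empty = pvFactAOut 2 (A[(m-1).toNat]'(by omega)) PySem.Dict.empty := by
      rw [PySem.List.pyGetD_eq_getElem _ _ hidx.1 hidx.2]
      rw [List.getElem_map]
    have hmt : (m - 1).toNat < A.length := by omega
    have hcur : ∀ (st1 : PySem.Dict Int Int) q,
        (∀ q', st1.getD q' 0 = pvS A q' l.toNat (m-1).toNat) →
        ((PySem.List.pyGetD (A.map (fun num => pvFactAOut 2 num PySem.Dict.empty)) (m - 1)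
            PySem.Dict.empty).items.foldl (fun c pe => c.modify pe.1 0 (· + pe.2)) st1).getD q 0
          = pvS A q l.toNat m.toNat := by
      intro st1 q hst1
      rw [hgete, pvFactAOut_items 2 _ PySem.Dict.empty (by omega) (by simp [PySem.Dict.empty])]
      have : PySem.Dict.empty.items = ([] : List (Int × Int)) := rfl
      rw [this]
      rw [addloop_getD _ _ _ (pvFactB_keys_nodup _), hst1]
      rw [show m.toNat = (m-1).toNat + 1 by omega]
      rw [pvS_step A q l.toNat (m-1).toNat (by omega) hmt]
      rfl
    have hok : ∀ (st1 : PySem.Dict Int Int),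
        (∀ q', st1.getD q' 0 = pvS A q' l.toNat (m-1).toNat) →
        pvIsDiv ((PySem.List.pyGetD (A.map (fun num => pvFactAOut 2 num PySem.Dict.empty)) (m - 1)
            PySem.Dict.empty).items.foldl (fun c pe => c.modify pe.1 0 (· + pe.2)) st1)
          (pvFactAOut 2 K PySem.Dict.empty)
          = pvOkP A K l.toNat m.toNat := by
      intro st1 hst1
      unfold pvIsDiv pvOkP
      rw [pvFact_items K]
      apply list_all_congr
      intro pe _
      rw [hcur st1 pe.1 hst1]
    rw [hrange, List.foldl_append, List.countP_append]
    constructor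
    · intro q
      simp only [List.foldl_cons, List.foldl_nil]
      exact hcur _ q ihd
    · simp only [List.foldl_cons, List.foldl_nil]
      rw [hok _ ihd, ihc]
      have hcnt : (m - 1 + 1).toNat = m.toNat := by omega
      by_cases hdiv : pvOkP A K l.toNat m.toNat
      · rw [if_pos hdiv]
        simp only [List.countP_cons, List.countP_nil, hcnt, hdiv, if_true]
        push_cast
        ring
      · rw [if_neg hdiv]
        have hdiv' : pvOkP A K l.toNat m.toNat = false := by
          revert hdiv; cases pvOkP A K l.toNat m.toNat <;> simp
        simp only [List.countP_cons, List.countP_nil, hcnt, hdiv', Bool.false_eq_true, if_false]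
        push_cast
        ring


theorem A_eq (A : List Int) (K : Int) :
    count_divisible_subarrays A K
      = ((PySem.List.pyRange 0 (A.length : Int)).map (fun l =>
          ((List.countP (fun r => pvOkP A K l.toNat (r + 1).toNat)
            (PySem.List.pyRange l (A.length : Int)) : Nat) : Int))).sum := by
  unfold count_divisible_subarrays
  dsimp only
  simp only [PySem.List.len]
  rw [PySem.List.foldl_congr_mem (PySem.List.pyRange 0 (A.length : Int)) _
    (fun count l => count + ((List.countP (fun r => pvOkP A K l.toNat (r + 1).toNat)
      (PySem.List.pyRange l (A.length : Int)) : Nat) : Int)) 0 ?_]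
  · rw [PySem.List.foldl_add]
    simp
  · intro acc l hl
    obtain ⟨hl0, hln⟩ := PySem.List.mem_pyRange_one.mp hl
    exact (innerA A K l hl0 ((A.length : Int) - l).toNat (A.length : Int)
      (by omega) (by omega) acc).2


theorem pyGetD_append_last (xs : List Int) (a : Int) :
    PySem.List.pyGetD (xs ++ [a]) (-1) 0 = a := by
  simp [PySem.List.pyGetD, PySem.List.pyGet?, PySem.List.pyIdx?]

theorem pvS_prefix (A X : List Int) (p : Int) (j : Nat) (hj : j ≤ A.length) :
    pvS (A ++ X) p 0 j = pvS A p 0 j := by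
  unfold pvS
  rw [List.take_append_of_le_length hj]

theorem prefList_eq (A : List Int) (p : Int) :
    (A.map (fun x => pvFactBOut 2 x [])).foldl
      (fun pref f => pref ++ [PySem.List.pyGetD pref (-1) 0 + pvExpIn f p]) [(0:Int)]
    = (List.range (A.length + 1)).map (fun j => pvS A p 0 j) := by
  induction A using List.reverseRecOn with
  | nil =>
    simp [pvS_self]
  | append_singleton A x ih =>
    rw [List.map_append, List.foldl_append, ih]
    simp only [List.map_cons, List.map_nil, List.foldl_cons, List.foldl_nil]
    have hlen : (A ++ [x]).length = A.length + 1 := by simp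
    rw [hlen]
    have hsplit : List.range (A.length + 1 + 1) = List.range (A.length + 1) ++ [A.length + 1] :=
      List.range_succ
    rw [hsplit, List.map_append]
    congr 1
    · apply List.map_congr_left
      intro j hj
      rw [List.mem_range] at hj
      exact (pvS_prefix A [x] p j (by omega)).symm
    · have hlast : (List.range (A.length + 1)).map (fun j => pvS A p 0 j)
          = (List.range A.length).map (fun j => pvS A p 0 j) ++ [pvS A p 0 A.length] := by
        rw [List.range_succ, List.map_append]
        simp
      rw [hlast, pyGetD_append_last]
      simp only [List.map_cons, List.map_nil]
      congr 1
      unfold pvS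
      rw [List.take_of_length_le (l := A) (by omega),
        List.take_of_length_le (l := A ++ [x]) (by simp)]
      simp [pvE]

theorem pvLBGo_spec (pref : List Int) (x : Int)
    (hmono : ∀ (i j : Nat) (hi1 : i < pref.length) (hj1 : j < pref.length), i ≤ j → pref[i] ≤ pref[j]) :
    ∀ (lo hi : Int), 0 ≤ lo → lo ≤ hi → hi ≤ (pref.length : Int) →
    (∀ (i : Nat) (hi2 : i < pref.length), (i : Int) < lo → pref[i] < x) →
    (∀ (i : Nat) (hi2 : i < pref.length), hi ≤ (i : Int) → x ≤ pref[i]) →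
    0 ≤ pvLBGo pref x lo hi ∧ pvLBGo pref x lo hi ≤ (pref.length : Int) ∧
    (∀ (i : Nat) (hi2 : i < pref.length), (i : Int) < pvLBGo pref x lo hi → pref[i] < x) ∧
    (∀ (i : Nat) (hi2 : i < pref.length), pvLBGo pref x lo hi ≤ (i : Int) → x ≤ pref[i]) := by
  intro lo hi
  induction lo, hi using pvLBGo.induct pref x with
  | case1 lo hi hlt mid hcond ih =>
    intro hlo0 hlh hhl hbelow habove
    rw [show mid = PySem.Int.floordiv (lo + hi) 2 from rfl] at hcond ih
    have hmid := PySem.Int.floordiv_two_mid_bounds (le_of_lt hlt)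
    have hmidlt : PySem.Int.floordiv (lo + hi) 2 < hi := by
      rw [PySem.Int.floordiv_lt_iff_lt_mul (by omega)]; omega
    rw [pvLBGo, dif_pos hlt]
    simp only [if_pos hcond]
    have hmlen : (PySem.Int.floordiv (lo + hi) 2).toNat < pref.length := by omega
    have hgm : PySem.List.pyGetD pref (PySem.Int.floordiv (lo + hi) 2) 0
        = pref[(PySem.Int.floordiv (lo + hi) 2).toNat] := by
      exact PySem.List.pyGetD_eq_getElem pref 0 (by omega) (by omega)
    refine ih (by omega) (by omega) hhl ?_ habove
    intro i hi2 hilt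
    rcases lt_or_ge (i : Int) lo with hcase | hcase
    · exact hbelow i hi2 hcase
    · calc pref[i] ≤ pref[(PySem.Int.floordiv (lo + hi) 2).toNat] :=
            hmono i _ hi2 hmlen (by omega)
        _ < x := by rw [← hgm]; exact hcond
  | case2 lo hi hlt mid hcond ih =>
    intro hlo0 hlh hhl hbelow habove
    rw [show mid = PySem.Int.floordiv (lo + hi) 2 from rfl] at hcond ih
    have hmid := PySem.Int.floordiv_two_mid_bounds (le_of_lt hlt)
    have hmidlt : PySem.Int.floordiv (lo + hi) 2 < hi := by
      rw [PySem.Int.floordiv_lt_iff_lt_mul (by omega)]; omega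
    rw [pvLBGo, dif_pos hlt]
    simp only [if_neg hcond]
    have hmlen : (PySem.Int.floordiv (lo + hi) 2).toNat < pref.length := by omega
    have hgm : PySem.List.pyGetD pref (PySem.Int.floordiv (lo + hi) 2) 0
        = pref[(PySem.Int.floordiv (lo + hi) 2).toNat] := by
      exact PySem.List.pyGetD_eq_getElem pref 0 (by omega) (by omega)
    refine ih hlo0 (by omega) (by omega) hbelow ?_
    intro i hi2 hge
    calc x ≤ pref[(PySem.Int.floordiv (lo + hi) 2).toNat] := by
            rw [← hgm]; omega
      _ ≤ pref[i] := hmono _ i hmlen hi2 (by omega)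
  | case3 lo hi hlt =>
    intro hlo0 hlh hhl hbelow habove
    rw [pvLBGo, dif_neg hlt]
    refine ⟨hlo0, by omega, hbelow, ?_⟩
    intro i hi2 hge
    exact habove i hi2 (by omega)


theorem pvLB_char (A : List Int) (p x : Int) (t : Int) (ht0 : 0 ≤ t) (htn : t ≤ (A.length : Int)) :
    pvLB ((List.range (A.length + 1)).map (fun j => pvS A p 0 j)) x ≤ t
      ↔ x ≤ pvS A p 0 t.toNat := by
  set P := (List.range (A.length + 1)).map (fun j => pvS A p 0 j) with hP
  have hPlen : P.length = A.length + 1 := by simp [hP]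
  have hPget : ∀ (i : Nat) (hi2 : i < P.length), P[i] = pvS A p 0 i := by
    intro i hi2
    simp [hP]
  have hmono : ∀ (i1 i2 : Nat) (hi1 : i1 < P.length) (hi2 : i2 < P.length), i1 ≤ i2 →
      P[i1] ≤ P[i2] := by
    intro i1 i2 hi1 hi2 h12
    rw [hPget i1 hi1, hPget i2 hi2]
    exact pvS_mono A p i1 i2 h12
  have hspec := pvLBGo_spec P x hmono 0 (P.length : Int) le_rfl (by positivity) le_rfl
    (fun i hi2 hneg => absurd hneg (by omega))
    (fun i hi2 hge => absurd hge (by omega))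
  obtain ⟨hr0, hrlen, hbel, habv⟩ := hspec
  have hulb : pvLB P x = pvLBGo P x 0 (P.length : Int) := by
    unfold pvLB
    rw [PySem.List.len]
  rw [hulb]
  have htN : t.toNat < P.length := by omega
  constructor
  · intro hle
    have := habv t.toNat htN (by omega)
    rw [hPget t.toNat htN] at this
    exact this
  · intro hle
    by_contra hgt
    have := hbel t.toNat htN (by omega)
    rw [hPget t.toNat htN] at this
    omega

theorem B_eq (A : List Int) (K : Int) :
    count_divisible_subarrays_alt A K
      = ((PySem.List.pyRange 0 (A.length : Int)).map (fun l =>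
          ((List.countP (fun r => pvOkP A K l.toNat (r + 1).toNat)
            (PySem.List.pyRange l (A.length : Int)) : Nat) : Int))).sum := by
  unfold count_divisible_subarrays_alt
  dsimp only
  simp only [PySem.List.len, prefList_eq]
  rw [PySem.List.foldl_congr_mem (PySem.List.pyRange 0 (A.length : Int)) _
    (fun count l => count + ((List.countP (fun r => pvOkP A K l.toNat (r + 1).toNat)
      (PySem.List.pyRange l (A.length : Int)) : Nat) : Int)) 0 ?_]
  · rw [PySem.List.foldl_add]
    simp
  · intro acc l hl
    obtain ⟨hl0, hln⟩ := PySem.List.mem_pyRange_one.mp hl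
    set n : Int := (A.length : Int) with hn
    set kf := pvFactBOut 2 K [] with hkf
    set prefs := kf.map (fun pe => (List.range (A.length + 1)).map (fun j => pvS A pe.1 0 j))
      with hprefs
    set f : Int → Int := fun j =>
      pvLB (PySem.List.pyGetD prefs j [])
        (PySem.List.pyGetD (PySem.List.pyGetD prefs j []) l 0
          + (PySem.List.pyGetD kf j (0, 0)).2) with hf
    set tl := (PySem.List.pyRange 0 (kf.length : Int)).foldl (fun t j => max t (f j)) l with htl
    -- characterize every binary-search result used by the fold
    have hfval : ∀ (j : Int) (hj0 : 0 ≤ j) (hjlen : j < (kf.length : Int))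
        (t : Int) (ht1 : l + 1 ≤ t) (ht2 : t ≤ n),
        (f j ≤ t ↔ pvS A ((kf[j.toNat]'(by omega)).1) 0 l.toNat + (kf[j.toNat]'(by omega)).2
          ≤ pvS A ((kf[j.toNat]'(by omega)).1) 0 t.toNat) := by
      intro j hj0 hjlen t ht1 ht2
      have hjN : j.toNat < kf.length := by omega
      have hPj : PySem.List.pyGetD prefs j []
          = (List.range (A.length + 1)).map (fun t2 => pvS A ((kf[j.toNat]'hjN).1) 0 t2) := by
        rw [hprefs, PySem.List.pyGetD_eq_getElem _ _ hj0 (by simp; omega), List.getElem_map]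
      have hkfj : PySem.List.pyGetD kf j (0, 0) = kf[j.toNat]'hjN :=
        PySem.List.pyGetD_eq_getElem _ _ hj0 (by omega)
      have hxl : PySem.List.pyGetD (PySem.List.pyGetD prefs j []) l 0
          = pvS A ((kf[j.toNat]'hjN).1) 0 l.toNat := by
        rw [hPj, PySem.List.pyGetD_eq_getElem _ _ hl0 (by simp; omega),
          List.getElem_map, List.getElem_range]
      simp only [hf]
      rw [hxl, hkfj, hPj]
      exact pvLB_char A ((kf[j.toNat]'hjN).1)
        (pvS A ((kf[j.toNat]'hjN).1) 0 l.toNat + (kf[j.toNat]'hjN).2) t (by omega) (by omega)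
    have htl_le : ∀ v : Int, tl ≤ v ↔ (l ≤ v ∧ ∀ j ∈ PySem.List.pyRange 0 (kf.length : Int), f j ≤ v) := by
      intro v
      rw [htl]
      exact foldl_max_le_iff _ f l v
    have htl_ge : l ≤ tl := ((htl_le tl).mp le_rfl).1
    -- the ok-predicate is exactly "threshold reached"
    have hok : ∀ (r : Int), l ≤ r → r < n →
        pvOkP A K l.toNat (r + 1).toNat = decide (tl ≤ r + 1) := by
      intro r hrl hrn
      have hlenf : ((pvFactBOut 2 K []).length : Int) = (kf.length : Int) := rfl
      have hiff : (pvOkP A K l.toNat (r + 1).toNat = true) ↔ tl ≤ r + 1 := by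
        unfold pvOkP
        rw [List.all_eq_true, htl_le (r + 1)]
        constructor
        · intro hall
          refine ⟨by omega, ?_⟩
          intro j hj
          obtain ⟨hj0, hjlen⟩ := PySem.List.mem_pyRange_one.mp hj
          have hjN : j.toNat < kf.length := by omega
          rw [hfval j hj0 hjlen (r + 1) (by omega) (by omega)]
          have := hall (kf[j.toNat]'hjN) (List.getElem_mem hjN)
          simp only [Bool.not_eq_eq_eq_not, Bool.not_true, decide_eq_false_iff_not, not_lt] at this
          have hsplit := pvS_split A ((kf[j.toNat]'hjN).1) l.toNat (r + 1).toNat (by omega)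
          omega
        · rintro ⟨-, hall⟩ pe hpe
          obtain ⟨j, hjlt, rfl⟩ := List.mem_iff_getElem.mp hpe
          have hj := hall (j : Int) (PySem.List.mem_pyRange_one.mpr ⟨by omega, by omega⟩)
          rw [hfval (j : Int) (by omega) (by omega) (r + 1) (by omega) (by omega)] at hj
          simp only [Int.toNat_natCast] at hj
          have hsplit := pvS_split A ((kf[j]'hjlt).1) l.toNat (r + 1).toNat (by omega)
          have c1 : ((pvFactBOut 2 K [])[j]'hjlt).2 = (kf[j]'hjlt).2 := rfl
          have c2 : pvS A (((pvFactBOut 2 K [])[j]'hjlt).1) l.toNat (r + 1).toNat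
              = pvS A ((kf[j]'hjlt).1) l.toNat (r + 1).toNat := rfl
          simp only [Bool.not_eq_eq_eq_not, Bool.not_true, decide_eq_false_iff_not, not_lt]
          omega
      rcases hb : pvOkP A K l.toNat (r + 1).toNat with _ | _
      · have : ¬ tl ≤ r + 1 := by rw [← hiff, hb]; simp
        simp [this]
      · have : tl ≤ r + 1 := hiff.mp hb
        simp [this]
    have hcnt : List.countP (fun r => pvOkP A K l.toNat (r + 1).toNat)
        (PySem.List.pyRange l n)
        = List.countP (fun r => decide (tl - 1 ≤ r)) (PySem.List.pyRange l n) := by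
      apply List.countP_congr
      intro r hr
      obtain ⟨hrl, hrn⟩ := PySem.List.mem_pyRange_one.mp hr
      rw [hok r hrl hrn]
      rcases le_or_gt tl (r + 1) with h | h
      · rw [decide_eq_true h, decide_eq_true (by omega : tl - 1 ≤ r)]
      · rw [decide_eq_false (by omega : ¬ tl ≤ r + 1), decide_eq_false (by omega : ¬ tl - 1 ≤ r)]
    beta_reduce
    rw [hcnt, countP_threshold l n (tl - 1)]
    have e1 := max_choice tl (l + 1)
    have ge1a := le_max_left tl (l + 1)
    have ge1b := le_max_right tl (l + 1)
    have e2 := max_choice l (tl - 1)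
    have ge2a := le_max_left l (tl - 1)
    have ge2b := le_max_right l (tl - 1)
    by_cases hc : max tl (l + 1) ≤ n
    · rw [if_pos hc]
      omega
    · rw [if_neg hc]
      omega

-- ===== VERDICT (by name: the statement is the Claim_ definition above) =====
theorem count_divisible_subarrays_spec : Claim_equal_count_divisible_subarrays := by
  intro A K _
  unfold Spec_count_divisible_subarrays
  rw [A_eq, B_eq]
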